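-- pv_equiv track=rewrite | github.com/rosenberg-c/racker | modular_units/cutter.py | stack_groups_for_plan
-- ===== SOURCE A (Python) =====
-- from typing import Iterable, List, Optional, Tuple, Union
--
-- def stack_groups_for_plan(
--     boards: List[Tuple[int, List[int]]],
-- ) -> List[Tuple[Tuple[int, ...], int]]:
--     groups = {}
--     for _board_length, pieces in boards:
--         key = tuple(sorted(pieces))
--         groups[key] = groups.get(key, 0) + 1
--     return sorted(groups.items(), key=lambda item: (-item[1], -len(item[0]), item[0]))
-- ===== SOURCE B (Python) =====
-- from typing import List, Tuple
--
--
-- def stack_groups_for_plan(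
--     boards: List[Tuple[int, List[int]]],
-- ) -> List[Tuple[Tuple[int, ...], int]]:
--     # Sort the normalised keys, then count runs of equal keys in one scan,
--     # instead of aggregating with a hash map.
--     keys = sorted(sorted(pieces) for _board_length, pieces in boards)
--     items = []
--     i = 0
--     n = len(keys)
--     while i < n:
--         j = i + 1
--         while j < n and keys[j] == keys[i]:
--             j += 1
--         items.append((tuple(keys[i]), j - i))
--         i = j
--     return sorted(items, key=lambda item: (-item[1], -len(item[0]), item[0]))
-- ===== Notes on version B (the rewrite author's own statement) =====
-- stated objective: alternative
-- what changed: Replaces the dict-based hash aggregation with sort-the-keys-then-count-runs-in-one-scan, then the identical final sort.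
import Mathlib
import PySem

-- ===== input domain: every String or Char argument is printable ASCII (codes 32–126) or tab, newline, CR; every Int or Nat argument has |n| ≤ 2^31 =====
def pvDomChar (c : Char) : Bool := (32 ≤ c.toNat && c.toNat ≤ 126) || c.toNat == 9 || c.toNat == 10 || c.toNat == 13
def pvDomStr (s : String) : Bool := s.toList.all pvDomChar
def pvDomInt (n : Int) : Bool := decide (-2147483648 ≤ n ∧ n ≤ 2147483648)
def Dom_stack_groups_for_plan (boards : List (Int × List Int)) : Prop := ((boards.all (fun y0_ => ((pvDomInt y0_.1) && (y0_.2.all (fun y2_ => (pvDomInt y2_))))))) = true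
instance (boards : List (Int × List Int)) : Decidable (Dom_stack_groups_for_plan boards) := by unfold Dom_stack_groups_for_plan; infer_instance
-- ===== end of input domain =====

-- B replaces A's dict aggregation with sort-then-count-runs; same final sort, same return value (alternative decomposition).

-- the shared final sort key: Python's (-item[1], -len(item[0]), item[0]) as a lexicographic triple
def sgpKey (it : List Int × Int) : Int ×ₗ (Int ×ₗ List Int) :=
  toLex (-it.2, toLex (-(it.1.length : Int), it.1))

-- ===== PORT A =====
def stack_groups_for_plan (boards : List (Int × List Int)) : List (List Int × Int) :=
  let groups :=
    boards.foldl
      (fun d b =>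
        let key := PySem.List.sorted b.2 (fun x => x) false
        d.insert key (d.getD key 0 + 1))
      PySem.Dict.empty
  PySem.List.sorted groups.items sgpKey false

-- ===== PORT B =====
-- the inner while loop of Source B: count the run of keys equal to the head, then continue after it
def groupRuns : List (List Int) → List (List Int × Int)
  | [] => []
  | x :: xs =>
      (x, 1 + ((xs.takeWhile (· == x)).length : Int)) :: groupRuns (xs.dropWhile (· == x))
termination_by l => l.length
decreasing_by
  simp only [List.length_cons]
  exact Nat.lt_succ_of_le (List.length_dropWhile_le _ _)

def stack_groups_for_plan_alt (boards : List (Int × List Int)) : List (List Int × Int) :=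
  let keys :=
    PySem.List.sorted (boards.map (fun b => PySem.List.sorted b.2 (fun x => x) false))
      (fun x => x) false
  PySem.List.sorted (groupRuns keys) sgpKey false

-- ===== PRECONDITION & SPEC =====
def Spec_stack_groups_for_plan (boards : List (Int × List Int)) (out : List (List Int × Int)) : Prop := out = stack_groups_for_plan_alt boards
instance (boards : List (Int × List Int)) (out : List (List Int × Int)) : Decidable (Spec_stack_groups_for_plan boards out) := by unfold Spec_stack_groups_for_plan; infer_instance

-- ===== CLAIM (what is proved, stated in full; the proofs are below) =====
def Claim_equal_stack_groups_for_plan : Prop := ∀ (boards : List (Int × List Int)), Dom_stack_groups_for_plan boards → Spec_stack_groups_for_plan boards (stack_groups_for_plan boards)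

-- ===== LEMMAS AND PROOFS =====

theorem sgpKey_injective : Function.Injective sgpKey := by
  intro a b h
  unfold sgpKey at h
  have h1 := congrArg (fun x => (ofLex x).1) h
  have h2 := congrArg (fun x => (ofLex (ofLex x).2).2) h
  simp at h1 h2
  exact Prod.ext h2 h1

-- on a ≤-sorted list the head does not reappear after its run
theorem not_mem_dropWhile_of_pairwise {α : Type} [LinearOrder α] [BEq α] [LawfulBEq α]
    (x : α) (xs : List α) (h : (x :: xs).Pairwise (· ≤ ·)) :
    x ∉ xs.dropWhile (· == x) := by
  intro hmem
  rcases List.pairwise_cons.1 h with ⟨hx, hxs⟩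
  rcases ht : xs.dropWhile (· == x) with _ | ⟨b, t'⟩
  · rw [ht] at hmem; exact absurd hmem (List.not_mem_nil)
  · rw [ht] at hmem
    have hsub : List.Sublist (xs.dropWhile (· == x)) xs := (List.dropWhile_suffix _).sublist
    have hbx : b ≠ x := by
      have := List.head?_dropWhile_not (· == x) xs
      rw [ht] at this; simpa using this
    have hble : x ≤ b := hx b (hsub.mem (by rw [ht]; exact List.mem_cons_self))
    have hblt : x < b := lt_of_le_of_ne hble (fun e => hbx e.symm)
    have hpt : (b :: t').Pairwise (· ≤ ·) := ht ▸ hxs.sublist hsub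
    rcases List.mem_cons.1 hmem with rfl | hmem'
    · exact hbx rfl
    · exact absurd hblt (not_lt.2 ((List.pairwise_cons.1 hpt).1 x hmem'))

-- membership characterisation of groupRuns on a sorted list
theorem mem_groupRuns (ys : List (List Int)) (h : ys.Pairwise (· ≤ ·)) (p : List Int × Int) :
    p ∈ groupRuns ys ↔ p.1 ∈ ys ∧ p.2 = (ys.count p.1 : Int) := by
  induction ys using groupRuns.induct with
  | case1 => simp [groupRuns]
  | case2 x xs ih =>
    have hxt : x ∉ xs.dropWhile (· == x) := not_mem_dropWhile_of_pairwise x xs h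
    have hsplit : xs.takeWhile (· == x) ++ xs.dropWhile (· == x) = xs :=
      List.takeWhile_append_dropWhile
    have hrun : ∀ a ∈ xs.takeWhile (· == x), a = x := by
      intro a ha
      have := List.mem_takeWhile_imp ha
      simpa using this
    have hsub : List.Sublist (xs.dropWhile (· == x)) xs := (List.dropWhile_suffix _).sublist
    have hpt : (xs.dropWhile (· == x)).Pairwise (· ≤ ·) :=
      ((List.pairwise_cons.1 h).2).sublist hsub
    have hcx : (x :: xs).count x = (xs.takeWhile (· == x)).length + 1 := by
      have h1 : xs.count x = (xs.takeWhile (· == x)).length := by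
        conv_lhs => rw [← hsplit]
        rw [List.count_append, List.count_eq_zero.2 hxt,
          List.count_eq_length.2 (fun b hb => (hrun b hb).symm), Nat.add_zero]
      rw [List.count_cons_self, h1]
    have hck : ∀ k, k ∈ xs.dropWhile (· == x) →
        (x :: xs).count k = (xs.dropWhile (· == x)).count k := by
      intro k hk
      have hkx : k ≠ x := fun e => hxt (e ▸ hk)
      have hxk : ¬ x = k := fun e => hkx e.symm
      have h1 : List.count k (x :: xs) = List.count k xs := by
        simp [hxk]
      rw [h1]
      conv_lhs => rw [← hsplit]
      rw [List.count_append, List.count_eq_zero.2 (fun hmem => hkx (hrun k hmem)),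
        Nat.zero_add]
    rw [groupRuns]
    constructor
    · intro hp
      rcases List.mem_cons.1 hp with rfl | hp'
      · exact ⟨List.mem_cons_self, by simp only [hcx]; push_cast; ring⟩
      · rcases (ih hpt).1 hp' with ⟨h1, h2⟩
        exact ⟨List.mem_cons.2 (Or.inr (hsub.mem h1)), by rw [hck _ h1]; exact h2⟩
    · rintro ⟨h1, h2⟩
      by_cases hpx : p.1 = x
      · have hpeq : p = (x, 1 + ((xs.takeWhile (· == x)).length : Int)) := by
          have h2' : p.2 = 1 + ((xs.takeWhile (· == x)).length : Int) := by
            rw [h2, hpx, hcx]; push_cast; ring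
          calc p = (p.1, p.2) := rfl
            _ = _ := by rw [hpx, h2']
        exact List.mem_cons.2 (Or.inl hpeq)
      · have hpxs : p.1 ∈ xs := by
          rcases List.mem_cons.1 h1 with h | h
          · exact absurd h hpx
          · exact h
        have hpt' : p.1 ∈ xs.dropWhile (· == x) := by
          rw [← hsplit] at hpxs
          rcases List.mem_append.1 hpxs with hl | hr
          · exact absurd (hrun _ hl) hpx
          · exact hr
        exact List.mem_cons.2
          (Or.inr ((ih hpt).2 ⟨hpt', by rw [h2, hck _ hpt']⟩))

theorem nodup_groupRuns (ys : List (List Int)) (h : ys.Pairwise (· ≤ ·)) :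
    (groupRuns ys).Nodup := by
  induction ys using groupRuns.induct with
  | case1 => simp [groupRuns]
  | case2 x xs ih =>
    have hxt : x ∉ xs.dropWhile (· == x) := not_mem_dropWhile_of_pairwise x xs h
    have hpt : (xs.dropWhile (· == x)).Pairwise (· ≤ ·) :=
      ((List.pairwise_cons.1 h).2).sublist (List.dropWhile_suffix _).sublist
    rw [groupRuns]
    refine List.nodup_cons.2 ⟨fun hmem => ?_, ih hpt⟩
    exact hxt ((mem_groupRuns _ hpt _).1 hmem).1

theorem groupRuns_perm_items (keys : List (List Int)) :
    (groupRuns (PySem.List.sorted keys (fun x => x) false)).Perm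
      ((PySem.Set.ofList keys).map (fun k => (k, (keys.count k : Int)))) := by
  have hE : (PySem.List.sorted keys (fun x => x) false)
      = @PySem.List.sorted (List ℤ) (List ℤ) List.instLinearOrder.toLT
          LinearOrder.toDecidableLT keys (fun x => x) false := by congr 1
  have hperm : (PySem.List.sorted keys (fun x => x) false).Perm keys :=
    PySem.List.sorted_perm keys (fun x => x) false
  have hpw : (PySem.List.sorted keys (fun x => x) false).Pairwise (· ≤ ·) := by
    have h0 := PySem.List.sorted_pairwise keys (fun x : List ℤ => x)
    rw [← hE] at h0
    exact h0
  apply (List.perm_ext_iff_of_nodup (nodup_groupRuns _ hpw) ?_).2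
  · intro p
    rw [mem_groupRuns _ hpw, List.mem_map]
    constructor
    · rintro ⟨h1, h2⟩
      refine ⟨p.1, (PySem.Set.mem_ofList _ _).2 (hperm.mem_iff.1 h1), ?_⟩
      rw [← hperm.count_eq] at *
      exact Prod.ext rfl h2.symm
    · rintro ⟨k, hk, rfl⟩
      exact ⟨hperm.mem_iff.2 ((PySem.Set.mem_ofList _ _).1 hk), by rw [hperm.count_eq]⟩
  · exact (PySem.Set.nodup_ofList keys).map
      (fun a b e => congrArg Prod.fst e)

-- ===== VERDICT (by name: the statement is the Claim_ definition above) =====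
theorem stack_groups_for_plan_spec : Claim_equal_stack_groups_for_plan := by
  intro boards _
  unfold Spec_stack_groups_for_plan stack_groups_for_plan stack_groups_for_plan_alt
  simp only
  have hf := List.foldl_map (f := fun b : Int × List Int => PySem.List.sorted b.2 (fun x => x) false)
      (g := fun (d : PySem.Dict (List Int) Int) key => d.insert key (d.getD key 0 + 1))
      (l := boards) (init := PySem.Dict.empty)
  rw [← hf, PySem.Dict.foldl_insert_getD_add_one_eq_counter, PySem.Dict.items_counter]
  exact PySem.List.sorted_eq_sorted_of_perm _ _ sgpKey sgpKey_injective
    (groupRuns_perm_items _).symm
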